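-- pv_equiv track=rewrite | github.com/dunistech/5_python_questions_monday26th_nov2024 | practice_problem_set_7/string_merge.py | mergeRecursive
-- ===== SOURCE A (Python) =====
-- def mergeRecursive(s1, s2):
--     # Base cases: If one string is empty, return the other string
--     if len(s1) == 0:
--         return s2
--     if len(s2) == 0:
--         return s1
--
--     # Recursive case: Compare the first characters of each string
--     if s1[0] < s2[0]:
--         # Include the smaller character from s1 and recursively merge the rest
--         return s1[0] + mergeRecursive(s1[1:], s2)
--     else:
--         # Include the smaller character from s2 and recursively merge the rest
--         return s2[0] + mergeRecursive(s1, s2[1:])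
-- ===== SOURCE B (Python) =====
-- def mergeRecursive(s1, s2):
--     # Block-copying merge: repeatedly copy the maximal run from the side
--     # whose head wins the comparison, as one slice.
--     out = []
--     i, j, n1, n2 = 0, 0, len(s1), len(s2)
--     while i < n1 and j < n2:
--         if s1[i] < s2[j]:
--             k = i + 1
--             while k < n1 and s1[k] < s2[j]:
--                 k += 1
--             out.append(s1[i:k])
--             i = k
--         else:
--             k = j + 1
--             while k < n2 and not (s1[i] < s2[k]):
--                 k += 1
--             out.append(s2[j:k])
--             j = k
--     out.append(s1[i:])
--     out.append(s2[j:])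
--     return ''.join(out)
-- ===== Notes on version B (the rewrite author's own statement) =====
-- stated objective: faster
-- what changed: Replaced the quadratic one-char-per-step slicing recursion with an iterative block-copying merge: while both strings remain, the maximal winning run from one side is located and appended as a single slice, and the leftovers are appended once at the end.
import Mathlib
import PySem

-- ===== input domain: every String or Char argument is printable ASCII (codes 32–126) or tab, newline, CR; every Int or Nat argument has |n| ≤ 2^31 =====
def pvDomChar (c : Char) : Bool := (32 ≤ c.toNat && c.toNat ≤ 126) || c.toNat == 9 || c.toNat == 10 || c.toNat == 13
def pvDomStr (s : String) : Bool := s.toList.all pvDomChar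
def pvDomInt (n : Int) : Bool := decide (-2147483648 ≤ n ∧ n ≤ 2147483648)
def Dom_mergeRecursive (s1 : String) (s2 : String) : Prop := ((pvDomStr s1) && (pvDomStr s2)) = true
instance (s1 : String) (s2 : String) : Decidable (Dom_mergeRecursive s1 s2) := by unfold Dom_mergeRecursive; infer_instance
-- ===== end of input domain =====

-- B replaces A's one-character-per-step slicing recursion by a block-copying merge
-- that transfers whole winning runs at a time (faster: linear vs quadratic).
-- ===== PORT A =====
-- A's recursion on the character lists, step for step
def mergeRecA : List Char → List Char → List Char
  | [], b => b
  | a, [] => a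
  | x :: xs, y :: ys =>
      if x < y then x :: mergeRecA xs (y :: ys)
      else y :: mergeRecA (x :: xs) ys

def mergeRecursive (s1 : String) (s2 : String) : String :=
  String.mk (mergeRecA s1.toList s2.toList)

-- ===== PORT B =====
-- block merge: copy the maximal run from the winning side in one slice
-- (run = takeWhile against the fixed head of the other side), then continue
def mergeBlocks : List Char → List Char → List Char
  | [], b => b
  | a, [] => a
  | x :: xs, y :: ys =>
      if x < y then
        (x :: xs.takeWhile (· < y)) ++ mergeBlocks (xs.dropWhile (· < y)) (y :: ys)
      else
        (y :: ys.takeWhile (fun c => !(x < c))) ++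
          mergeBlocks (x :: xs) (ys.dropWhile (fun c => !(x < c)))
termination_by a b => a.length + b.length
decreasing_by
  · have := xs.length_dropWhile_le (p := (· < y)); simp; omega
  · have := ys.length_dropWhile_le (p := fun c => !(x < c)); simp; omega

def mergeRecursive_alt (s1 : String) (s2 : String) : String :=
  String.mk (mergeBlocks s1.toList s2.toList)

-- ===== PRECONDITION & SPEC =====
def Spec_mergeRecursive (s1 : String) (s2 : String) (out : String) : Prop := out = mergeRecursive_alt s1 s2
instance (s1 : String) (s2 : String) (out : String) : Decidable (Spec_mergeRecursive s1 s2 out) := by unfold Spec_mergeRecursive; infer_instance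

-- ===== CLAIM (what is proved, stated in full; the proofs are below) =====
def Claim_equal_mergeRecursive : Prop := ∀ (s1 : String) (s2 : String), Dom_mergeRecursive s1 s2 → Spec_mergeRecursive s1 s2 (mergeRecursive s1 s2)

-- ===== LEMMAS AND PROOFS =====
-- A's recursion eats a whole run of the left side while its chars beat y
theorem mergeRecA_runL (y : Char) (ys : List Char) : ∀ a : List Char,
    mergeRecA a (y :: ys) =
      a.takeWhile (· < y) ++ mergeRecA (a.dropWhile (· < y)) (y :: ys) := by
  intro a
  induction a with
  | nil => simp
  | cons x xs ih =>
    by_cases h : x < y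
    · simp [mergeRecA, h, ih]
    · simp [mergeRecA, h, List.takeWhile_cons, List.dropWhile_cons]

-- and symmetrically a whole run of the right side while x does not beat its chars
theorem mergeRecA_runR (x : Char) (xs : List Char) : ∀ b : List Char,
    mergeRecA (x :: xs) b =
      b.takeWhile (fun c => !(x < c)) ++
        mergeRecA (x :: xs) (b.dropWhile (fun c => !(x < c))) := by
  intro b
  induction b with
  | nil => simp [mergeRecA]
  | cons y ys ih =>
    by_cases h : x < y
    · simp [mergeRecA, h, List.takeWhile_cons, List.dropWhile_cons]
    · simp [mergeRecA, h, ih]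

theorem mergeBlocks_eq : ∀ (n : ℕ) (a b : List Char), a.length + b.length ≤ n →
    mergeBlocks a b = mergeRecA a b := by
  intro n
  induction n with
  | zero =>
    intro a b h
    match a, b with
    | [], b => simp [mergeBlocks, mergeRecA]
    | x :: xs, b => simp at h
  | succ n ih =>
    intro a b h
    match a, b with
    | [], b => simp [mergeBlocks, mergeRecA]
    | x :: xs, [] => simp [mergeBlocks, mergeRecA]
    | x :: xs, y :: ys =>
      by_cases hxy : x < y
      · have hlen := xs.length_dropWhile_le (p := (· < y))
        have hRHS : mergeRecA (x :: xs) (y :: ys) =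
            x :: (xs.takeWhile (· < y) ++
              mergeRecA (xs.dropWhile (· < y)) (y :: ys)) := by
          conv_lhs => rw [mergeRecA]
          rw [if_pos hxy, mergeRecA_runL y ys xs]
        rw [mergeBlocks, if_pos hxy,
          ih (xs.dropWhile (· < y)) (y :: ys) (by simp at h ⊢; omega), hRHS]
        simp
      · have hlen := ys.length_dropWhile_le (p := fun c => !(x < c))
        have hRHS : mergeRecA (x :: xs) (y :: ys) =
            y :: (ys.takeWhile (fun c => !(x < c)) ++
              mergeRecA (x :: xs) (ys.dropWhile (fun c => !(x < c)))) := by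
          conv_lhs => rw [mergeRecA]
          rw [if_neg hxy, mergeRecA_runR x xs ys]
        rw [mergeBlocks, if_neg hxy,
          ih (x :: xs) (ys.dropWhile (fun c => !(x < c))) (by simp at h ⊢; omega), hRHS]
        simp

-- ===== VERDICT (by name: the statement is the Claim_ definition above) =====
theorem mergeRecursive_spec : Claim_equal_mergeRecursive := by
  intro s1 s2 _
  unfold Spec_mergeRecursive mergeRecursive mergeRecursive_alt
  rw [mergeBlocks_eq (s1.toList.length + s2.toList.length) _ _ le_rfl]
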